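-- pv_equiv track=rewrite | github.com/AshobaS/Algo-Graphe | code/AlgoPrim.py | SommetsNonExplores
-- ===== SOURCE A (Python) =====
-- def SommetsNonExplores(SommetsExplores,G):
--     SommetSNExp=[]
--     n=len(SommetsExplores)
--     N=len(G)
--     for k in range(N):
--         Test=0
--         for i in range(n):
--             if k+1==SommetsExplores[i]:
--                 Test=1
--         if Test==0:
--             SommetSNExp.append(k+1)
--     return SommetSNExp
-- ===== SOURCE B (Python) =====
-- def SommetsNonExplores(SommetsExplores, G):
--     # Two-pointer merge: sort the deduplicated explored vertices once, then
--     # sweep k = 1..len(G) advancing a single pointer through the sorted list.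
--     ex = sorted(set(SommetsExplores))
--     out = []
--     j = 0
--     for k in range(1, len(G) + 1):
--         while j < len(ex) and ex[j] < k:
--             j += 1
--         if j < len(ex) and ex[j] == k:
--             j += 1
--         else:
--             out.append(k)
--     return out
-- ===== Notes on version B (the rewrite author's own statement) =====
-- stated objective: faster
-- what changed: Replaces A's nested per-vertex scan of SommetsExplores with a sort-then-merge sweep: sort the deduplicated explored vertices once, then walk k=1..len(G) with a single pointer through the sorted list (a two-pointer sorted-set difference, no membership test per vertex).
import Mathlib
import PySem

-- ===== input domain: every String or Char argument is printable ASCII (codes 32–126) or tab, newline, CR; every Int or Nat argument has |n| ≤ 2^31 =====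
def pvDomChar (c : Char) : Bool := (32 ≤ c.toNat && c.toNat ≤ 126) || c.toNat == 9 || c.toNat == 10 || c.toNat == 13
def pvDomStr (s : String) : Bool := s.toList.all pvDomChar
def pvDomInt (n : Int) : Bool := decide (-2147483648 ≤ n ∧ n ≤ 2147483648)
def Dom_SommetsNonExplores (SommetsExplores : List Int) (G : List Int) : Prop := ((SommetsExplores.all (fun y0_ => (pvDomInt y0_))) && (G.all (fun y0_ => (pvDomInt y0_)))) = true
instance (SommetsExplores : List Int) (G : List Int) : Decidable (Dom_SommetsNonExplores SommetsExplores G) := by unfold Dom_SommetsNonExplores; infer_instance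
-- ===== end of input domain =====

-- B replaces A's nested per-vertex scan by a sort-then-merge sweep: sort the
-- deduplicated explored vertices once, then advance a single pointer through
-- that sorted list while k runs 1..len(G) (objective: faster, two-pointer merge).

-- ===== PORT A =====
def SommetsNonExplores (SommetsExplores : List Int) (G : List Int) : List Int :=
  let n : Int := SommetsExplores.length
  let N : Int := G.length
  (PySem.List.pyRange 0 N 1).foldl (fun acc k =>
    let test : Int := (PySem.List.pyRange 0 n 1).foldl (fun t i =>
      if k + 1 = PySem.List.pyGetD SommetsExplores i 0 then 1 else t) 0
    if test = 0 then acc ++ [k + 1] else acc) []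

-- ===== PORT B =====
-- the 'while j < len(ex) and ex[j] < k: j += 1' loop of Source B
def pvAdv (ex : List Int) (k : Int) (j : Nat) : Nat :=
  if h : j < ex.length then
    if ex[j] < k then pvAdv ex k (j + 1) else j
  else j
termination_by ex.length - j

def SommetsNonExplores_alt (SommetsExplores : List Int) (G : List Int) : List Int :=
  let ex : List Int := PySem.List.sorted (PySem.Set.ofList SommetsExplores) (fun x => x)
  let r := (PySem.List.pyRange 1 ((G.length : Int) + 1) 1).foldl
    (fun (st : Nat × List Int) k =>
      let j := pvAdv ex k st.1
      if h : j < ex.length then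
        if ex[j] = k then (j + 1, st.2) else (j, st.2 ++ [k])
      else (j, st.2 ++ [k])) (0, [])
  r.2

-- ===== PRECONDITION & SPEC =====
def Spec_SommetsNonExplores (SommetsExplores : List Int) (G : List Int) (out : List Int) : Prop := out = SommetsNonExplores_alt SommetsExplores G
instance (SommetsExplores : List Int) (G : List Int) (out : List Int) : Decidable (Spec_SommetsNonExplores SommetsExplores G out) := by unfold Spec_SommetsNonExplores; infer_instance

-- ===== CLAIM (what is proved, stated in full; the proofs are below) =====
def Claim_equal_SommetsNonExplores : Prop := ∀ (SommetsExplores : List Int) (G : List Int), Dom_SommetsNonExplores SommetsExplores G → Spec_SommetsNonExplores SommetsExplores G (SommetsNonExplores SommetsExplores G)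

-- ===== LEMMAS AND PROOFS =====

-- A's inner flag loop computes a membership test of k+1 in SommetsExplores.
theorem pvInnerTest (SE : List Int) (k t : Int) :
    SE.foldl (fun t x => if k + 1 = x then (1 : Int) else t) t
      = if k + 1 ∈ SE then 1 else t := by
  induction SE generalizing t with
  | nil => simp
  | cons h l ih =>
    simp only [List.foldl_cons, ih, List.mem_cons]
    by_cases hk : k + 1 = h <;> simp [hk]

-- A computes the ascending filter of 1..N by the vertices not in SE.
theorem pvA_filter (SE G : List Int) :
    SommetsNonExplores SE G
      = (PySem.List.pyRange 1 ((G.length : Int) + 1) 1).filter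
          (fun x => !(decide (x ∈ SE))) := by
  unfold SommetsNonExplores
  simp only []
  have hInner : ∀ k : Int,
      (PySem.List.pyRange 0 (SE.length : Int) 1).foldl (fun t i =>
        if k + 1 = PySem.List.pyGetD SE i 0 then (1 : Int) else t) 0
      = if k + 1 ∈ SE then 1 else 0 := by
    intro k
    rw [show ((SE.length : Int)) = PySem.List.len SE from rfl]
    rw [PySem.List.foldl_pyRange_pyGetD SE 0 (fun t x => if k + 1 = x then (1:Int) else t) 0
      (a := 0) (by norm_num)]
    simpa using pvInnerTest SE k 0
  have hfun : (fun (acc : List Int) (k : Int) =>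
      let test : Int := (PySem.List.pyRange 0 (SE.length : Int) 1).foldl (fun t i =>
        if k + 1 = PySem.List.pyGetD SE i 0 then 1 else t) 0
      if test = 0 then acc ++ [k + 1] else acc)
      = (fun acc k => if (!(decide (k + 1 ∈ SE))) = true then acc ++ [k + 1] else acc) := by
    funext acc k
    simp only [hInner k]
    by_cases hk : k + 1 ∈ SE <;> simp [hk]
  rw [hfun, PySem.List.foldl_append_if]
  simp only [List.nil_append]
  have hshift : PySem.List.pyRange 1 ((G.length : Int) + 1) 1
      = (PySem.List.pyRange 0 (G.length : Int) 1).map (fun k => k + 1) := by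
    rw [PySem.List.pyRange_one 1 ((G.length : Int) + 1), PySem.List.pyRange_one 0 (G.length : Int)]
    simp [List.map_map, Function.comp]
    intro a _
    omega
  rw [hshift, List.filter_map]
  congr 1

-- pvAdv skips exactly the strict lower part of the remaining suffix.
theorem pvAdv_drop (ex : List Int) (k : Int) :
    ∀ (s : List Int) (j : Nat), ex.drop j = s →
      pvAdv ex k j = j + (s.takeWhile (fun x => decide (x < k))).length := by
  intro s
  induction s with
  | nil =>
    intro j hdrop
    have hj : ¬ j < ex.length := by
      have := List.drop_eq_nil_iff.mp hdrop
      omega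
    rw [pvAdv]
    simp [hj]
  | cons x s' ih =>
    intro j hdrop
    have hlen : j < ex.length := by
      have := congrArg List.length hdrop
      simp [List.length_drop] at this
      omega
    have hget : ex[j]'hlen = x := by
      have h0 : (ex.drop j)[0]'(by simp [hdrop]) = x := by simp [hdrop]
      simpa using h0
    have hdrop' : ex.drop (j + 1) = s' := by
      have : (ex.drop j).drop 1 = ex.drop (j + 1) := by
        rw [List.drop_drop]
      rw [← this, hdrop]
      simp
    rw [pvAdv]
    simp only [hlen, dif_pos, hget]
    by_cases hx : x < k
    · rw [if_pos hx, ih (j + 1) hdrop']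
      simp [hx]
      omega
    · rw [if_neg hx]
      simp [hx]

-- The merge sweep over a strictly increasing k-list produces the filter.
theorem pvMerge (ex : List Int) (hex : ex.Pairwise (· < ·)) :
    ∀ (L : List Int) (j : Nat) (acc : List Int),
      L.Pairwise (· < ·) →
      (∀ y ∈ ex.take j, ∀ m ∈ L, y < m) →
      (L.foldl (fun (st : Nat × List Int) k =>
          let j := pvAdv ex k st.1
          if h : j < ex.length then
            if ex[j] = k then (j + 1, st.2) else (j, st.2 ++ [k])
          else (j, st.2 ++ [k])) (j, acc)).2
        = acc ++ L.filter (fun x => !(decide (x ∈ ex))) := by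
  intro L
  induction L with
  | nil => intro j acc _ _; simp
  | cons k L' ih =>
    intro j acc hL hinv
    have hLk : ∀ m ∈ L', k < m := fun m hm => List.rel_of_pairwise_cons hL hm
    have hL' : L'.Pairwise (· < ·) := hL.of_cons
    set s : List Int := ex.drop j with hs
    set t : List Int := s.takeWhile (fun x => decide (x < k)) with ht
    set d : List Int := s.dropWhile (fun x => decide (x < k)) with hd
    have hadv : pvAdv ex k j = j + t.length := pvAdv_drop ex k s j rfl
    set j' : Nat := j + t.length with hj'
    have htd : t ++ d = s := List.takeWhile_append_dropWhile
    have hdropj' : ex.drop j' = d := by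
      have : ex.drop j' = (ex.drop j).drop t.length := by
        rw [List.drop_drop]
      rw [this, ← hs, ← htd]
      simp
    have htakej' : ex.take j' = ex.take j ++ t := by
      have := List.take_add (l := ex) (i := j) (j := t.length)
      rw [hj', this, ← hs, ← htd]
      simp
    have htlt : ∀ y ∈ t, y < k := by
      intro y hy
      have := List.mem_takeWhile_imp hy
      simpa using this
    have htake_lt : ∀ y ∈ ex.take j', y < k := by
      intro y hy
      rw [htakej'] at hy
      rcases List.mem_append.mp hy with h | h
      · exact hinv y h k (by simp)
      · exact htlt y h
    have hmem_split : k ∈ ex ↔ k ∈ d := by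
      constructor
      · intro hk
        rw [← List.take_append_drop j' ex] at hk
        rcases List.mem_append.mp hk with h | h
        · exact absurd (htake_lt k h) (lt_irrefl k)
        · rwa [hdropj'] at h
      · intro hk
        rw [← hdropj'] at hk
        exact List.mem_of_mem_drop hk
    have hdpair : d.Pairwise (· < ·) := by
      have hsub : d.Sublist s := List.dropWhile_sublist _
      exact (hex.drop (i := j)).sublist hsub
    -- step through the head of L
    rw [List.foldl_cons]
    simp only [hadv]
    cases hdc : d with
    | nil =>
      have hnlt : ¬ j' < ex.length := by
        have : ex.length - j' = 0 := by
          have := congrArg List.length hdropj'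
          simp [hdc] at this
          omega
        omega
      have hknotmem : ¬ k ∈ ex := by
        rw [hmem_split, hdc]; simp
      rw [dif_neg hnlt]
      rw [ih j' (acc ++ [k]) hL' (by
        intro y hy m hm
        exact lt_trans (htake_lt y hy) (hLk m hm))]
      simp [hknotmem]
    | cons x d' =>
      have hlen : j' < ex.length := by
        have := congrArg List.length hdropj'
        simp [hdc] at this
        omega
      have hget : ex[j']'hlen = x := by
        have h0 : (ex.drop j')[0]'(by simp [hdropj', hdc]) = x := by
          simp [hdropj', hdc]
        simpa using h0
      have hxk : ¬ x < k := by
        have : ¬ (decide (x < k)) = true := by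
          have := List.head?_dropWhile_not (fun x => decide (x < k)) s
          rw [← hd, hdc] at this
          simpa using this
        simpa using this
      have hd'gt : ∀ y ∈ d', x < y := by
        rw [hdc] at hdpair
        exact fun y hy => List.rel_of_pairwise_cons hdpair hy
      rw [dif_pos hlen]
      by_cases hxe : x = k
      · -- found: skip k
        rw [if_pos (by rw [hget, hxe])]
        have hkmem : k ∈ ex := by
          rw [hmem_split, hdc, hxe]; simp
        rw [ih (j' + 1) acc hL' (by
          intro y hy m hm
          have : ex.take (j' + 1) = ex.take j' ++ [x] := by
            rw [List.take_add_one]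
            simp [List.getElem?_eq_getElem hlen, hget]
          rw [this] at hy
          rcases List.mem_append.mp hy with h | h
          · exact lt_trans (htake_lt y h) (hLk m hm)
          · simp at h
            rw [h, hxe]
            exact hLk m hm)]
        simp [hkmem]
      · -- not found: keep k
        rw [if_neg (by rw [hget]; exact hxe)]
        have hknotmem : ¬ k ∈ ex := by
          rw [hmem_split, hdc]
          simp only [List.mem_cons]
          push Not
          constructor
          · exact fun h => hxe h.symm
          · intro hk
            have hxk2 : k ≤ x := not_lt.mp hxk
            have := hd'gt k hk
            omega
        rw [ih j' (acc ++ [k]) hL' (by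
          intro y hy m hm
          exact lt_trans (htake_lt y hy) (hLk m hm))]
        simp [hknotmem]

theorem SommetsNonExplores_spec_aux (SE G : List Int) :
    SommetsNonExplores SE G = SommetsNonExplores_alt SE G := by
  rw [pvA_filter]
  unfold SommetsNonExplores_alt
  simp only []
  set ex : List Int := PySem.List.sorted (PySem.Set.ofList SE) (fun x => x) with hex
  have hexp : ex.Pairwise (· < ·) := PySem.List.sorted_ofList_pairwise_lt SE
  rw [pvMerge ex hexp (PySem.List.pyRange 1 ((G.length : Int) + 1) 1) 0 []
    (PySem.List.pairwise_lt_pyRange_one 1 ((G.length : Int) + 1)) (by simp)]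
  simp only [List.nil_append]
  apply List.filter_congr
  intro x _
  have : x ∈ ex ↔ x ∈ SE := by
    rw [hex, PySem.List.mem_sorted]
    exact PySem.Set.mem_ofList SE x
  simp [this]

-- ===== VERDICT (by name: the statement is the Claim_ definition above) =====
theorem SommetsNonExplores_spec : Claim_equal_SommetsNonExplores := by
  intro SE G _
  exact SommetsNonExplores_spec_aux SE G
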